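-- pv_equiv track=rewrite | github.com/cuber-it/2021-11_kursrepo_python_f | Teilnehmer/tn07/file_compare.py | process
-- ===== SOURCE A (Python) =====
-- def process(file_list, hash_list):
--     result = {}
--     for i, hashvalue in enumerate(hash_list):
--         filename = file_list[i]
--         if not hashvalue in result:
--             result[hashvalue] = []
--         result[hashvalue].append(filename)
--     return result
-- ===== SOURCE B (Python) =====
-- def process(file_list, hash_list):
--     uniques = list(dict.fromkeys(hash_list))
--     return {h: [file_list[i] for i, hv in enumerate(hash_list) if hv == h]
--             for h in uniques}
-- ===== Notes on version B (the rewrite author's own statement) =====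
-- stated objective: alternative
-- what changed: A builds the dict incrementally (guarded insert then append per element); B first computes the distinct hashes in first-seen order via dict.fromkeys and then builds the whole dict in one comprehension, collecting each key's complete group by an indexed scan of hash_list, so no dict is ever mutated.
import Mathlib
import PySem

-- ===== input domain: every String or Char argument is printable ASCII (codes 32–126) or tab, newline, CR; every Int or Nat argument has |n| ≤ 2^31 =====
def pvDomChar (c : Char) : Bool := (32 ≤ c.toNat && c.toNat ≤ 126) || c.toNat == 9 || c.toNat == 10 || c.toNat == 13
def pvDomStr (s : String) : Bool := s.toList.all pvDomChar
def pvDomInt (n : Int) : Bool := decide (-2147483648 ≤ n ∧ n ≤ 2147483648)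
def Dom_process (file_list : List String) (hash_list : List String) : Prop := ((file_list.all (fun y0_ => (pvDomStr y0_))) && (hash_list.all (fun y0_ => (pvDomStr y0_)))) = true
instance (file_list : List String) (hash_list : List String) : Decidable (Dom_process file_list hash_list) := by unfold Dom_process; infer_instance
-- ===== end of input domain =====

-- B replaces A's incremental dict-building pass by a dedup of the hashes followed by one
-- comprehension computing each key's whole group; same return value on Pre_; objective: alternative.

-- ===== PORT A =====
-- step of A's loop body: filename = file_list[i] (pyGet? none = IndexError, excluded by Pre_);
-- 'if not hashvalue in result: result[hashvalue] = []' ; 'result[hashvalue].append(filename)'.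
def processStep (file_list : List String) (result : PySem.Dict String (List String))
    (p : Int × String) : PySem.Dict String (List String) :=
  match PySem.List.pyGet? file_list p.1 with
  | none => result   -- Python raises IndexError here; such inputs are outside Pre_process
  | some filename =>
    let result := if result.contains p.2 then result else result.insert p.2 ([] : List String)
    result.modify p.2 [] (fun l => l ++ [filename])

def process (file_list : List String) (hash_list : List String) : List (String × List String) :=
  ((PySem.List.enumerate hash_list).foldl (processStep file_list) PySem.Dict.empty).items

-- ===== PORT B =====
-- '[file_list[i] for i, hv in enumerate(hash_list) if hv == h]'; pyGet? none = IndexError,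
-- excluded by Pre_process.
def groupOf (file_list : List String) (hash_list : List String) (h : String) : List String :=
  (PySem.List.enumerate hash_list).filterMap
    (fun p => if p.2 == h then PySem.List.pyGet? file_list p.1 else none)

def process_alt (file_list : List String) (hash_list : List String) : List (String × List String) :=
  let uniques := PySem.List.dedup hash_list
  (uniques.foldl
    (fun (acc : PySem.Dict String (List String)) h => acc.insert h (groupOf file_list hash_list h))
    PySem.Dict.empty).items

-- ===== PRECONDITION & SPEC =====
-- Both A and B raise IndexError when file_list is shorter than hash_list (file_list[i] with
-- i ≥ len(file_list)); exactly those inputs are excluded.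
def Pre_process (file_list : List String) (hash_list : List String) : Prop :=
  hash_list.length ≤ file_list.length
instance (file_list : List String) (hash_list : List String) : Decidable (Pre_process file_list hash_list) := by unfold Pre_process; infer_instance

def pvWitness_process : List String × List String := (["f1", "f2", "f3"], ["h", "g", "h"])

def Spec_process (file_list : List String) (hash_list : List String) (out : List (String × List String)) : Prop := out = process_alt file_list hash_list
instance (file_list : List String) (hash_list : List String) (out : List (String × List String)) : Decidable (Spec_process file_list hash_list out) := by unfold Spec_process; infer_instance

-- ===== CLAIM (what is proved, stated in full; the proofs are below) =====
def Claim_equal_process : Prop := ∀ (file_list : List String) (hash_list : List String), Dom_process file_list hash_list → Pre_process file_list hash_list → Spec_process file_list hash_list (process file_list hash_list)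

-- ===== LEMMAS AND PROOFS =====

-- A's loop body collapses to a single Dict.modify (the guarded 'result[h] = []' is absorbed).
theorem processStep_eq_modify (d : PySem.Dict String (List String)) (k f : String) :
    ((if d.contains k then d else d.insert k ([] : List String)).modify k [] (fun l => l ++ [f]))
      = d.modify k [] (fun l => l ++ [f]) := by
  by_cases h : d.contains k
  · simp [h]
  · simp only [h, Bool.false_eq_true, ite_false]
    simp only [PySem.Dict.modify, PySem.Dict.getD_insert_self, PySem.Dict.insert_insert_self,
      PySem.Dict.getD_of_not_contains _ _ (by simpa using h)]

-- A's fold over enumerate(hash_list) equals the same fold over the zipped pairs (index s on).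
theorem foldA_enumerate_eq_zip (hash_list : List String) :
    ∀ (s : Nat) (file_list : List String) (d : PySem.Dict String (List String)),
    s + hash_list.length ≤ file_list.length →
    (PySem.List.enumerate hash_list (s : Int)).foldl (processStep file_list) d
      = ((file_list.drop s).zip hash_list).foldl
          (fun d p => d.modify p.2 [] (fun l => l ++ [p.1])) d := by
  induction hash_list with
  | nil => intro s fl d _; simp [PySem.List.enumerate_nil]
  | cons h t ih =>
    intro s fl d hlen
    have hs : s < fl.length := by simp at hlen; omega
    rw [PySem.List.enumerate_cons, List.drop_eq_getElem_cons hs]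
    simp only [List.zip_cons_cons, List.foldl_cons]
    have : ((s : Int) + 1) = ((s + 1 : Nat) : Int) := by push_cast; ring
    rw [this, ih (s + 1) fl _ (by simp at hlen ⊢; omega)]
    congr 1
    simp [processStep, PySem.List.pyGet?_natCast, List.getElem?_eq_getElem hs,
      processStep_eq_modify]

-- B's comprehension over enumerate equals the same filterMap over the zipped pairs (index s on).
theorem groupOf_enumerate_eq_zip (hash_list : List String) :
    ∀ (s : Nat) (file_list : List String) (c : String),
    s + hash_list.length ≤ file_list.length →
    (PySem.List.enumerate hash_list (s : Int)).filterMap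
        (fun p => if p.2 == c then PySem.List.pyGet? file_list p.1 else none)
      = ((file_list.drop s).zip hash_list).filterMap
          (fun q => if q.2 == c then some q.1 else none) := by
  induction hash_list with
  | nil => intro s fl c _; simp [PySem.List.enumerate_nil]
  | cons h t ih =>
    intro s fl c hlen
    have hs : s < fl.length := by simp at hlen; omega
    rw [PySem.List.enumerate_cons, List.drop_eq_getElem_cons hs]
    simp only [List.zip_cons_cons, List.filterMap_cons]
    have : ((s : Int) + 1) = ((s + 1 : Nat) : Int) := by push_cast; ring
    rw [this, ih (s + 1) fl c (by simp at hlen ⊢; omega)]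
    by_cases he : h = c
    · simp [he, PySem.List.pyGet?_natCast, List.getElem?_eq_getElem hs]
    · simp [he]

-- B's insert loop: lookup after the fold (the value written for a key depends only on the key).
theorem foldB_get? (f : String → List String) :
    ∀ (l : List String) (acc : PySem.Dict String (List String)) (c : String),
    (l.foldl (fun acc h => acc.insert h (f h)) acc).get? c
      = if c ∈ l then some (f c) else acc.get? c := by
  intro l
  induction l with
  | nil => simp
  | cons h t ih =>
    intro acc c
    simp only [List.foldl_cons, ih, List.mem_cons]
    by_cases hc : c ∈ t
    · simp [hc]
    · by_cases he : c = h <;> simp [hc, he, PySem.Dict.get?_insert]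

-- the group of key c among the pairs, re-indexed through Prod.swap
theorem group_eq (ps : List (String × String)) (c : String) :
    ps.filterMap (fun q => if q.2 == c then some q.1 else none)
      = ((ps.map Prod.swap).filter (fun p => p.1 == c)).map (fun p => p.2) := by
  induction ps with
  | nil => rfl
  | cons p t ih => by_cases h : p.2 = c <;> simp [h, Prod.swap] <;> simpa using ih

theorem process_eq_alt (file_list hash_list : List String)
    (hlen : hash_list.length ≤ file_list.length) :
    process file_list hash_list = process_alt file_list hash_list := by
  unfold process process_alt
  have h0 : (0 : Int) = ((0 : Nat) : Int) := rfl
  rw [h0, foldA_enumerate_eq_zip hash_list 0 file_list PySem.Dict.empty (by simpa using hlen)]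
  simp only [List.drop_zero]
  set ps := file_list.zip hash_list with hps
  set g : String → List String :=
    fun c => ps.filterMap (fun q => if q.2 == c then some q.1 else none) with hg
  have hsnd : ps.map Prod.snd = hash_list := List.map_snd_zip hlen
  -- each B group is g of its key
  have hgroup : ∀ c, groupOf file_list hash_list c = g c := by
    intro c
    have := groupOf_enumerate_eq_zip hash_list 0 file_list c (by simpa using hlen)
    simp only [groupOf, hg, hps]
    exact this
  set dA := ps.foldl (fun d (p : String × String) => d.modify p.2 [] (fun l => l ++ [p.1]))
      PySem.Dict.empty with hdA
  set dB := (PySem.List.dedup hash_list).foldl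
      (fun (acc : PySem.Dict String (List String)) h => acc.insert h (groupOf file_list hash_list h))
      PySem.Dict.empty with hdB
  have hkA : dA.keys = PySem.Set.ofList hash_list := by
    rw [hdA, PySem.Dict.keys_foldl_modify_key ps (fun p => p.2) [] (fun _ p l => l ++ [p.1])]
    simp only [PySem.Dict.empty, PySem.Dict.keys, List.map_nil, PySem.Set.update_nil_left]
    exact congrArg _ hsnd
  have hkB : dB.keys = PySem.Set.ofList hash_list := by
    rw [hdB, PySem.Dict.keys_foldl_insert (PySem.List.dedup hash_list)
      (fun d h => groupOf file_list hash_list h) PySem.Dict.empty]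
    simp only [PySem.Dict.empty, PySem.Dict.keys, List.map_nil, PySem.Set.update_nil_left]
    simp [PySem.Set.ofList_ofList]
  have hndA : dA.keys.Nodup := by
    rw [hdA]
    exact PySem.Dict.nodup_keys_foldl_modify_key ps (fun p => p.2) [] (fun _ p l => l ++ [p.1])
      PySem.Dict.empty (by simp)
  have hndB : dB.keys.Nodup := by
    rw [hdB]
    exact PySem.Dict.nodup_keys_foldl_insert (PySem.List.dedup hash_list)
      (fun d h => groupOf file_list hash_list h) PySem.Dict.empty (by simp)
  rw [PySem.Dict.items_eq_map_keys dA hndA [], PySem.Dict.items_eq_map_keys dB hndB [],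
    hkA, hkB]
  apply List.map_congr_left
  intro c hc
  have hmem : c ∈ hash_list := (PySem.Set.mem_ofList _ c).mp hc
  have hBc : dB.getD c [] = g c := by
    rw [PySem.Dict.getD_eq_get?_getD, hdB,
      foldB_get? (groupOf file_list hash_list) (PySem.List.dedup hash_list) PySem.Dict.empty c,
      if_pos (by simpa [PySem.List.mem_dedup] using hmem)]
    simp [hgroup c]
  have hAc : dA.getD c [] = g c := by
    have hswapA : dA = (ps.map Prod.swap).foldl
        (fun d p => d.modify p.1 [] (fun l => l ++ [p.2])) PySem.Dict.empty := by
      rw [hdA, List.foldl_map]; rfl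
    rw [hswapA, PySem.Dict.getD_foldl_modify_append (ps.map Prod.swap) PySem.Dict.empty c]
    simp only [hg]
    rw [group_eq]
    rfl
  rw [hAc, hBc]

-- ===== VERDICT (by name: the statement is the Claim_ definition above) =====
theorem process_spec : Claim_equal_process := by
  intro file_list hash_list _ hpre
  exact process_eq_alt file_list hash_list hpre
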